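-- pv_equiv track=rewrite | github.com/JaekwonHa/problem_solving | Codewars/Best_travel.py | choose_sum_recursive
-- ===== SOURCE A (Python) =====
-- def choose_sum_recursive(t, k, remain):
--     if t < 0 or k < 0:
--         return None
--
--     if k == 0:
--         return t
--
--     answer = None
--     for i in range(0, len(remain)):
--         result = choose_sum_recursive(t - remain[i], k - 1, remain[i+1:])
--         if result is not None:
--             if answer is None:
--                 answer = result
--             else:
--                 answer = min(answer, result)
--
--     return answer
-- ===== SOURCE B (Python) =====
-- def choose_sum_recursive(t, k, remain):
--     # Iterative subset-sum DP: one left-to-right pass maintaining the set of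
--     # reachable (count, leftover) states (leftover kept >= 0, count <= k).
--     if t < 0 or k < 0:
--         return None
--     states = {(0, t)}
--     for x in remain:
--         new = {(c + 1, r - x) for (c, r) in states if c < k and r - x >= 0}
--         states |= new
--     finals = [r for (c, r) in states if c == k]
--     return min(finals) if finals else None
-- ===== Notes on version B (the rewrite author's own statement) =====
-- stated objective: alternative
-- what changed: Replaced A's recursive enumeration over all size-k index subsets (with repeated list slicing) by a single left-to-right pass maintaining the deduplicated set of reachable (count, leftover) states, reading the minimum leftover among count==k states at the end.
import Mathlib
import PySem

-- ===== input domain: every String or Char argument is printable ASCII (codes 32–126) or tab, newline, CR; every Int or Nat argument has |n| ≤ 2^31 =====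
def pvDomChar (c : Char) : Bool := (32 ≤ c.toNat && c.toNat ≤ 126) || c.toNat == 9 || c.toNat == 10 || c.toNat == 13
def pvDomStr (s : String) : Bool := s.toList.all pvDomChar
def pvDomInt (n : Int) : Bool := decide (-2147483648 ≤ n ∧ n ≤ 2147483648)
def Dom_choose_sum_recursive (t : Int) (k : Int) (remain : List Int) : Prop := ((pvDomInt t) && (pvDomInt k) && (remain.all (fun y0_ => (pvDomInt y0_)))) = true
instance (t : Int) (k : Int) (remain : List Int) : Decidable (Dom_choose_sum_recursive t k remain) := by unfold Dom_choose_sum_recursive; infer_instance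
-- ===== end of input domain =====

-- B replaces A's exponential recursion over suffixes by one left-to-right pass
-- maintaining the deduplicated set of reachable (count, leftover) states.

-- ===== PORT A =====
-- the accumulator update of A's for-loop:
--   if result is not None: answer = result if answer is None else min(answer, result)
def optMin (answer result : Option Int) : Option Int :=
  match result with
  | none => answer
  | some r => match answer with
    | none => some r
    | some a => some (min a r)

-- A's `for i in range(0, len(remain))` visits remain[i] and recurses on the slice
-- remain[i+1:], i.e. at each step the head x and the tail rest of the current
-- suffix — csrLoop is that loop as structural recursion over the same suffixes,
-- carrying the same `answer` accumulator.
mutual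
def choose_sum_recursive (t : Int) (k : Int) (remain : List Int) : Option Int :=
  if t < 0 ∨ k < 0 then none
  else if k = 0 then some t
  else csrLoop t k remain none
termination_by 2 * remain.length + 1

def csrLoop (t : Int) (k : Int) (lst : List Int) (answer : Option Int) : Option Int :=
  match lst with
  | [] => answer
  | x :: rest => csrLoop t k rest (optMin answer (choose_sum_recursive (t - x) (k - 1) rest))
termination_by 2 * lst.length
end

-- ===== PORT B =====
-- one step of B's loop: new = {(c+1, r-x) for (c,r) in states if c < k and r-x >= 0}; states |= new
def csrStep (k : Int) (states : PySem.Set (Int × Int)) (x : Int) : PySem.Set (Int × Int) :=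
  let new : PySem.Set (Int × Int) :=
    PySem.Set.ofList (((states.filter (fun p => p.1 < k ∧ 0 ≤ p.2 - x)).map (fun p => (p.1 + 1, p.2 - x))))
  PySem.Set.union states new

def choose_sum_recursive_alt (t : Int) (k : Int) (remain : List Int) : Option Int :=
  if t < 0 ∨ k < 0 then none
  else
    let states := remain.foldl (csrStep k) (PySem.Set.ofList [(0, t)])
    let finals := (states.filter (fun p => p.1 = k)).map (fun p => p.2)
    -- `min(finals) if finals else None` : PySem.List.min? is none exactly on []
    PySem.List.min? finals (fun y => y)

-- ===== PRECONDITION & SPEC =====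
def Spec_choose_sum_recursive (t : Int) (k : Int) (remain : List Int) (out : Option Int) : Prop := out = choose_sum_recursive_alt t k remain
instance (t : Int) (k : Int) (remain : List Int) (out : Option Int) : Decidable (Spec_choose_sum_recursive t k remain out) := by unfold Spec_choose_sum_recursive; infer_instance

-- ===== CLAIM (what is proved, stated in full; the proofs are below) =====
def Claim_equal_choose_sum_recursive : Prop := ∀ (t : Int) (k : Int) (remain : List Int), Dom_choose_sum_recursive t k remain → Spec_choose_sum_recursive t k remain (choose_sum_recursive t k remain)

-- ===== LEMMAS AND PROOFS =====

-- omin g l : the running optMin of g over l (the shape of A's loop accumulator)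
def omin {α : Type} (g : α → Option Int) (l : List α) : Option Int :=
  l.foldl (fun a p => optMin a (g p)) none

theorem optMin_none_left (b : Option Int) : optMin none b = b := by
  cases b <;> rfl

theorem optMin_comm (a b : Option Int) : optMin a b = optMin b a := by
  cases a <;> cases b <;> simp [optMin, Int.min_comm]

theorem optMin_assoc (a b c : Option Int) : optMin (optMin a b) c = optMin a (optMin b c) := by
  cases a <;> cases b <;> cases c <;> simp [optMin, Int.min_assoc]

theorem optMin_left_comm (a b c : Option Int) : optMin a (optMin b c) = optMin b (optMin a c) := by
  rw [← optMin_assoc, optMin_comm a b, optMin_assoc]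

theorem foldl_optMin_init {α : Type} (g : α → Option Int) (l : List α) (a : Option Int) :
    l.foldl (fun a p => optMin a (g p)) a = optMin a (omin g l) := by
  induction l generalizing a with
  | nil => simp [omin, optMin]
  | cons p l ih =>
    simp only [omin, List.foldl_cons] at *
    rw [ih, ih (optMin none (g p)), optMin_none_left, ← optMin_assoc]

theorem omin_cons {α : Type} (g : α → Option Int) (p : α) (l : List α) :
    omin g (p :: l) = optMin (g p) (omin g l) := by
  simp only [omin, List.foldl_cons]
  rw [foldl_optMin_init, optMin_none_left]
  rfl

theorem omin_append {α : Type} (g : α → Option Int) (l₁ l₂ : List α) :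
    omin g (l₁ ++ l₂) = optMin (omin g l₁) (omin g l₂) := by
  simp only [omin, List.foldl_append]
  rw [foldl_optMin_init]
  rfl

theorem omin_congr_mem {α : Type} (g₁ g₂ : α → Option Int) (l : List α)
    (h : ∀ p ∈ l, g₁ p = g₂ p) : omin g₁ l = omin g₂ l := by
  induction l with
  | nil => rfl
  | cons p l ih =>
    rw [omin_cons, omin_cons, h p (by simp), ih (fun q hq => h q (by simp [hq]))]

theorem omin_absorb {α : Type} (g : α → Option Int) (l : List α) (p : α)
    (hp : p ∈ l) : optMin (omin g l) (g p) = omin g l := by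
  induction l with
  | nil => simp at hp
  | cons q l ih =>
    rw [omin_cons]
    rcases List.mem_cons.mp hp with h | h
    · subst h
      rw [optMin_assoc, optMin_comm (omin g l) (g p), ← optMin_assoc]
      congr 1
      cases g p <;> simp [optMin]
    · rw [optMin_assoc, ih h]

theorem omin_subset_absorb {α : Type} (g : α → Option Int) (l₁ l₂ : List α)
    (h : ∀ p ∈ l₁, p ∈ l₂) : optMin (omin g l₂) (omin g l₁) = omin g l₂ := by
  induction l₁ with
  | nil => cases omin g l₂ <;> rfl
  | cons p l ih =>
    rw [omin_cons, ← optMin_assoc, omin_absorb g l₂ p (h p (by simp)),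
      ih (fun q hq => h q (by simp [hq]))]

theorem omin_mem_congr {α : Type} (g : α → Option Int) (l₁ l₂ : List α)
    (h : ∀ p, p ∈ l₁ ↔ p ∈ l₂) : omin g l₁ = omin g l₂ := by
  calc omin g l₁ = optMin (omin g l₁) (omin g l₂) :=
        (omin_subset_absorb g l₂ l₁ (fun p hp => (h p).mpr hp)).symm
    _ = optMin (omin g l₂) (omin g l₁) := optMin_comm _ _
    _ = omin g l₂ := omin_subset_absorb g l₁ l₂ (fun p hp => (h p).mp hp)

theorem omin_optMin_split {α : Type} (g₁ g₂ : α → Option Int) (l : List α) :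
    omin (fun p => optMin (g₁ p) (g₂ p)) l = optMin (omin g₁ l) (omin g₂ l) := by
  induction l with
  | nil => rfl
  | cons p l ih =>
    rw [omin_cons, omin_cons, omin_cons, ih, optMin_assoc,
      optMin_left_comm (g₂ p) (omin g₁ l) (omin g₂ l), ← optMin_assoc]

theorem omin_filter {α : Type} (g : α → Option Int) (f : α → Prop) [DecidablePred f]
    (l : List α) :
    omin g (l.filter (fun p => decide (f p))) = omin (fun p => if f p then g p else none) l := by
  induction l with
  | nil => rfl
  | cons p l ih =>
    by_cases h : f p
    · rw [List.filter_cons_of_pos (by simp [h]), omin_cons, omin_cons, ih, if_pos h]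
    · rw [List.filter_cons_of_neg (by simp [h]), omin_cons, ih, if_neg h, optMin_none_left]

theorem omin_map {α β : Type} (g : β → Option Int) (f : α → β) (l : List α) :
    omin g (l.map f) = omin (fun p => g (f p)) l := by
  induction l with
  | nil => rfl
  | cons p l ih => rw [List.map_cons, omin_cons, omin_cons, ih]

-- min(xs) (Python; None on []) is the running optMin over the list
theorem foldl_min_some (t : List Int) (x : Int) :
    t.foldl (fun a y => optMin a (some y)) (some x) = some (t.foldl min x) := by
  induction t generalizing x with
  | nil => rfl
  | cons y t ih => simpa [optMin] using ih (min x y)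

theorem min?_eq_omin (l : List Int) :
    PySem.List.min? l (fun y => y) = omin (fun y => some y) l := by
  cases l with
  | nil => rfl
  | cons x t =>
    rw [PySem.List.min?_id_cons, omin_cons, ← foldl_optMin_init, foldl_min_some]

-- the extraction at the end of B's loop, in omin form
theorem extract_eq_omin (k : Int) (S : List (Int × Int)) :
    PySem.List.min? ((S.filter (fun p => p.1 = k)).map (fun p => p.2)) (fun y => y)
      = omin (fun p => if p.1 = k then some p.2 else none) S := by
  rw [min?_eq_omin, omin_map, omin_filter (fun p => some p.2) (fun p => p.1 = k) S]

-- A's loop accumulator splits off the initial value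
theorem csrLoop_init (t k : Int) (lst : List Int) (a : Option Int) :
    csrLoop t k lst a = optMin a (csrLoop t k lst none) := by
  induction lst generalizing a with
  | nil => simp [csrLoop, optMin]
  | cons x rest ih =>
    rw [csrLoop, csrLoop, ih, ih (optMin none _), optMin_none_left, optMin_assoc]

-- A's recurrence: prefix-pruned take/skip, valid whenever the current leftover is ≥ 0
theorem csr_cons (t k x : Int) (rest : List Int) (ht : 0 ≤ t) :
    choose_sum_recursive t k (x :: rest)
      = optMin (choose_sum_recursive (t - x) (k - 1) rest) (choose_sum_recursive t k rest) := by
  rcases lt_trichotomy k 0 with hk | hk | hk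
  · rw [choose_sum_recursive.eq_def t k (x :: rest), if_pos (Or.inr hk),
      choose_sum_recursive.eq_def (t - x) (k - 1) rest, if_pos (Or.inr (by omega)),
      choose_sum_recursive.eq_def t k rest, if_pos (Or.inr hk)]
    rfl
  · subst hk
    rw [choose_sum_recursive.eq_def t 0 (x :: rest), if_neg (by omega), if_pos rfl,
      choose_sum_recursive.eq_def (t - x) (0 - 1) rest, if_pos (Or.inr (by omega)),
      choose_sum_recursive.eq_def t 0 rest, if_neg (by omega), if_pos rfl]
    rfl
  · rw [choose_sum_recursive.eq_def t k (x :: rest), if_neg (by omega), if_neg (by omega),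
      choose_sum_recursive.eq_def t k rest, if_neg (by omega), if_neg (by omega),
      csrLoop, csrLoop_init, optMin_none_left]

-- the loop invariant: every state's leftover is nonnegative
def StInv (S : List (Int × Int)) : Prop := ∀ p ∈ S, 0 ≤ p.2

theorem stInv_step (k x : Int) (S : PySem.Set (Int × Int)) (h : StInv S) :
    StInv (csrStep k S x) := by
  intro p hp
  rw [csrStep] at hp
  rcases (PySem.Set.mem_union _ _ _).mp hp with h1 | h1
  · exact h p h1
  · obtain ⟨q, hq, rfl⟩ := List.mem_map.mp ((PySem.Set.mem_ofList _ _).mp h1)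
    have h2 := (List.mem_filter.mp hq).2
    simp only [decide_eq_true_eq] at h2
    simpa using h2.2

-- the heart: B's DP from any nonnegative state set computes the omin of A over those states
theorem dp_eq (k : Int) (rem : List Int) :
    ∀ (S : PySem.Set (Int × Int)), StInv S →
      PySem.List.min?
          (((rem.foldl (csrStep k) S).filter (fun p => p.1 = k)).map (fun p => p.2)) (fun y => y)
        = omin (fun p => choose_sum_recursive p.2 (k - p.1) rem) S := by
  induction rem with
  | nil =>
    intro S hS
    rw [List.foldl_nil, extract_eq_omin]
    apply omin_congr_mem
    intro p hp
    rcases lt_trichotomy (k - p.1) 0 with hlt | heq | hgt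
    · rw [if_neg (by omega), choose_sum_recursive.eq_def, if_pos (Or.inr hlt)]
    · rw [if_pos (by omega), choose_sum_recursive.eq_def,
        if_neg (by have := hS p hp; omega), if_pos heq]
    · rw [if_neg (by omega), choose_sum_recursive.eq_def,
        if_neg (by have := hS p hp; omega), if_neg (by omega), csrLoop]
  | cons x rest ih =>
    intro S hS
    rw [List.foldl_cons, ih (csrStep k S x) (stInv_step k x S hS)]
    have hmem : ∀ p, p ∈ csrStep k S x ↔
        p ∈ S ++ ((S.filter (fun p => p.1 < k ∧ 0 ≤ p.2 - x)).map (fun p => (p.1 + 1, p.2 - x))) := by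
      intro p
      rw [csrStep, PySem.Set.mem_union, PySem.Set.mem_ofList, List.mem_append]
    rw [omin_mem_congr _ _ _ hmem, omin_append, omin_map,
      omin_filter (fun p => choose_sum_recursive (p.2 - x) (k - (p.1 + 1)) rest)
        (fun p => p.1 < k ∧ 0 ≤ p.2 - x) S]
    rw [omin_congr_mem
      (fun p => if p.1 < k ∧ 0 ≤ p.2 - x then choose_sum_recursive (p.2 - x) (k - (p.1 + 1)) rest else none)
      (fun p => choose_sum_recursive (p.2 - x) (k - p.1 - 1) rest) S ?_]
    · rw [← omin_optMin_split]
      apply omin_congr_mem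
      intro p hp
      dsimp only
      rw [csr_cons p.2 (k - p.1) x rest (hS p hp)]
      exact optMin_comm _ _
    · intro p hp
      dsimp only
      by_cases h : p.1 < k ∧ 0 ≤ p.2 - x
      · rw [if_pos h]
        congr 1
        omega
      · rw [if_neg h]
        rcases not_and_or.mp h with h1 | h1
        · rw [choose_sum_recursive.eq_def, if_pos (Or.inr (by omega))]
        · rw [choose_sum_recursive.eq_def, if_pos (Or.inl (by omega))]

-- ===== VERDICT (by name: the statement is the Claim_ definition above) =====
theorem choose_sum_recursive_spec : Claim_equal_choose_sum_recursive := by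
  intro t k remain _
  unfold Spec_choose_sum_recursive
  simp only [choose_sum_recursive_alt]
  by_cases h : t < 0 ∨ k < 0
  · rw [if_pos h, choose_sum_recursive.eq_def, if_pos h]
  · rw [if_neg h]
    have h0 : StInv (PySem.Set.ofList [((0 : Int), t)]) := by
      intro p hp
      have : p = ((0 : Int), t) := by simpa using (PySem.Set.mem_ofList _ _).mp hp
      subst this
      simpa using by omega
    rw [dp_eq k remain (PySem.Set.ofList [(0, t)]) h0]
    have hof : PySem.Set.ofList [((0 : Int), t)] = [((0 : Int), t)] := rfl
    rw [hof, omin_cons]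
    show choose_sum_recursive t k remain
      = optMin (choose_sum_recursive t (k - 0) remain) (omin _ [])
    rw [show k - 0 = k from by omega]
    cases choose_sum_recursive t k remain <;> rfl
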